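-- pv_equiv track=rewrite | github.com/MicahTrieb/bootDevCoding | Course 9/Chapter 2/followerPrediction.py | get_follower_prediction
-- ===== SOURCE A (Python) =====
-- def get_follower_prediction(follower_count, influencer_type, num_months):
--     returnValue = follower_count
--     if influencer_type == "fitness":
--         while num_months >= 1:
--             returnValue = returnValue * 4
--             num_months -= 1
--     if influencer_type == "cosmetic":
--         while num_months >= 1:
--             returnValue = returnValue * 3
--             num_months -= 1
--     else:
--         while num_months >= 1:
--             returnValue = returnValue * 2
--             num_months -= 1
--     return returnValue
-- ===== SOURCE B (Python) =====
-- def get_follower_prediction(follower_count, influencer_type, num_months):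
--     if influencer_type == "fitness":
--         base = 4
--     elif influencer_type == "cosmetic":
--         base = 3
--     else:
--         base = 2
--     return follower_count * base ** max(0, num_months)
-- ===== Notes on version B (the rewrite author's own statement) =====
-- stated objective: faster
-- what changed: Replaces the per-month multiplication loops with a single closed-form exponentiation follower_count * base**max(0,num_months).
import Mathlib
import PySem

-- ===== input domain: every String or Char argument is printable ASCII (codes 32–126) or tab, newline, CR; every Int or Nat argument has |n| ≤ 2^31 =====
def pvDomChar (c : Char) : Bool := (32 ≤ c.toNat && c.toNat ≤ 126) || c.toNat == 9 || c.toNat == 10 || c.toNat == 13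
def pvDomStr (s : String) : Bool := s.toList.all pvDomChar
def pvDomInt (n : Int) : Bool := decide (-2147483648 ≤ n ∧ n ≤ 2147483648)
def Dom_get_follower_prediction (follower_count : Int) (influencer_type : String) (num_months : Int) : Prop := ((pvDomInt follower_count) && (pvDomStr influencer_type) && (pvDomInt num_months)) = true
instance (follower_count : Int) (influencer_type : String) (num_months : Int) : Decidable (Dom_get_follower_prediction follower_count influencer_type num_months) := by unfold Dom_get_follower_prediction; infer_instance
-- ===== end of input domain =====

-- B replaces A's per-month multiplication loops with one closed-form exponentiation (faster).


-- ===== PORT A =====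
-- while num_months >= 1: returnValue *= b; num_months -= 1  (returns final returnValue and num_months)
def pvLoopMul (returnValue : Int) (b : Int) (num_months : Int) : Int × Int :=
  if num_months ≥ 1 then pvLoopMul (returnValue * b) b (num_months - 1)
  else (returnValue, num_months)
termination_by num_months.toNat
decreasing_by omega

def get_follower_prediction (follower_count : Int) (influencer_type : String) (num_months : Int) : Int :=
  let r0 := follower_count
  let (r1, n1) := if influencer_type = "fitness" then pvLoopMul r0 4 num_months else (r0, num_months)
  if influencer_type = "cosmetic" then (pvLoopMul r1 3 n1).1
  else (pvLoopMul r1 2 n1).1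

-- ===== PORT B =====
def get_follower_prediction_alt (follower_count : Int) (influencer_type : String) (num_months : Int) : Int :=
  let base : Int := if influencer_type = "fitness" then 4 else if influencer_type = "cosmetic" then 3 else 2
  follower_count * base ^ (max 0 num_months).toNat

-- ===== PRECONDITION & SPEC =====
def Spec_get_follower_prediction (follower_count : Int) (influencer_type : String) (num_months : Int) (out : Int) : Prop := out = get_follower_prediction_alt follower_count influencer_type num_months
instance (follower_count : Int) (influencer_type : String) (num_months : Int) (out : Int) : Decidable (Spec_get_follower_prediction follower_count influencer_type num_months out) := by unfold Spec_get_follower_prediction; infer_instance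

-- ===== CLAIM (what is proved, stated in full; the proofs are below) =====
def Claim_equal_get_follower_prediction : Prop := ∀ (follower_count : Int) (influencer_type : String) (num_months : Int), Dom_get_follower_prediction follower_count influencer_type num_months → Spec_get_follower_prediction follower_count influencer_type num_months (get_follower_prediction follower_count influencer_type num_months)

-- ===== LEMMAS AND PROOFS =====

-- ===== VERDICT (by name: the statement is the Claim_ definition above) =====
theorem pvLoopMul_eq (k : Nat) : ∀ (n r b : Int), n.toNat = k →
    pvLoopMul r b n = (r * b ^ k, min n 0) := by
  induction k with
  | zero =>
    intro n r b h
    rw [pvLoopMul]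
    have hn : ¬ n ≥ 1 := by omega
    simp [hn]
    omega
  | succ k ih =>
    intro n r b h
    rw [pvLoopMul]
    have hn : n ≥ 1 := by omega
    simp only [hn, if_pos]
    rw [ih (n-1) (r*b) b (by omega)]
    simp only [Prod.mk.injEq]
    constructor
    · ring
    · omega

theorem get_follower_prediction_spec : Claim_equal_get_follower_prediction := by
  intro fc t n _
  unfold Spec_get_follower_prediction get_follower_prediction get_follower_prediction_alt
  have h2 := pvLoopMul_eq n.toNat n fc 2 rfl
  have h3 := pvLoopMul_eq n.toNat n fc 3 rfl
  have h4 := pvLoopMul_eq n.toNat n fc 4 rfl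
  have hmin : (min n 0).toNat = 0 := by omega
  have hmax : (max 0 n).toNat = n.toNat := by omega
  by_cases hf : t = "fitness"
  · have hc : t ≠ "cosmetic" := by subst hf; decide
    have h2' := pvLoopMul_eq 0 (min n 0) (fc * 4 ^ n.toNat) 2 hmin
    simp [hf, hc, h4, h2', hmax]
  · by_cases hc : t = "cosmetic"
    · simp [hf, hc, h3, hmax]
    · simp [hf, hc, h2, hmax]
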